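-- pv_equiv track=rewrite | github.com/MAPMG79/Altium2KiCAD_db | migration_tool/core/mapping_engine.py | _get_fallback_footprint
-- ===== SOURCE A (Python) =====
-- from typing import Dict, List, Any, Optional, Tuple, Union
--
-- def _get_fallback_footprint(component_data: Dict[str, Any]) -> str:
--     """
--     Get fallback footprint when no good match is found.
--
--     Args:
--         component_data: Component data dictionary
--
--     Returns:
--         KiCAD footprint name
--     """
--     # Use basic heuristics for fallback
--     description = component_data.get('Description', '').lower()
--
--     # Check for basic component indicators
--     if any(term in description for term in ['resistor', 'res', 'ohm']):
--         return 'Resistor_SMD:R_0603_1608Metric'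
--     elif any(term in description for term in ['capacitor', 'cap']):
--         return 'Capacitor_SMD:C_0603_1608Metric'
--     elif any(term in description for term in ['inductor', 'ind']):
--         return 'Inductor_SMD:L_0603_1608Metric'
--     elif any(term in description for term in ['diode']):
--         return 'Diode_SMD:D_SOD-123'
--     elif any(term in description for term in ['transistor', 'fet', 'mosfet']):
--         return 'Package_TO_SOT_SMD:SOT-23'
--     else:
--         return 'Package_SO:SOIC-8_3.9x4.9mm_P1.27mm'  # Ultimate fallback
-- ===== SOURCE B (Python) =====
-- # Minimal keyword set (subsumed keywords like 'resistor'⊇'res', 'capacitor'⊇'cap',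
-- # 'inductor'⊇'ind', 'mosfet'⊇'fet' dropped); pick the footprint of the minimum
-- # priority among all matching keywords (5 = ultimate fallback).
-- _KEYWORD_PRIORITY = [
--     ('res', 0), ('ohm', 0),
--     ('cap', 1),
--     ('ind', 2),
--     ('diode', 3),
--     ('transistor', 4), ('fet', 4),
-- ]
--
-- _FOOTPRINTS = [
--     'Resistor_SMD:R_0603_1608Metric',
--     'Capacitor_SMD:C_0603_1608Metric',
--     'Inductor_SMD:L_0603_1608Metric',
--     'Diode_SMD:D_SOD-123',
--     'Package_TO_SOT_SMD:SOT-23',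
--     'Package_SO:SOIC-8_3.9x4.9mm_P1.27mm',
-- ]
--
-- def _get_fallback_footprint(component_data):
--     description = component_data.get('Description', '').lower()
--     best = min((p for kw, p in _KEYWORD_PRIORITY if kw in description), default=5)
--     return _FOOTPRINTS[best]
-- ===== Notes on version B (the rewrite author's own statement) =====
-- stated objective: alternative
-- what changed: Replaces the five-way any()-cascade with a flat keyword->priority map reduced by substring subsumption (resistor/capacitor/inductor/mosfet dropped since they contain res/cap/ind/fet), taking the minimum priority among all matching keywords and indexing a footprint table.
import Mathlib
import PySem

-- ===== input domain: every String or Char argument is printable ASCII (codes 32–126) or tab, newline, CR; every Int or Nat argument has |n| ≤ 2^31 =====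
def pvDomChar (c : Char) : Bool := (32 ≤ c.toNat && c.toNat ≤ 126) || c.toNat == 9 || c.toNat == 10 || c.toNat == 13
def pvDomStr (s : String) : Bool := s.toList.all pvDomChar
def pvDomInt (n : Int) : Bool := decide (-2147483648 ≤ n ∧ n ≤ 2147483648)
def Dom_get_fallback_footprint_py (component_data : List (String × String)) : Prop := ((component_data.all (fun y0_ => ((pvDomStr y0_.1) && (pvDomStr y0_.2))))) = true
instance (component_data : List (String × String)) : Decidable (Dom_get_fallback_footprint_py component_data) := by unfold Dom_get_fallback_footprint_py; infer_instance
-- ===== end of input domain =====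

-- B replaces the if/elif any()-cascade by a flat keyword→priority map (subsumed keywords
-- dropped: 'resistor'⊇'res', 'capacitor'⊇'cap', 'inductor'⊇'ind', 'mosfet'⊇'fet'),
-- taking the minimum priority among matching keywords and indexing a footprint table.

-- ===== PORT A =====
def get_fallback_footprint_py (component_data : List (String × String)) : String :=
  let description := PySem.Str.lower ((PySem.Dict.ofList component_data).getD "Description" "")
  if ["resistor", "res", "ohm"].any (fun term => PySem.Str.isIn term description) then
    "Resistor_SMD:R_0603_1608Metric"
  else if ["capacitor", "cap"].any (fun term => PySem.Str.isIn term description) then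
    "Capacitor_SMD:C_0603_1608Metric"
  else if ["inductor", "ind"].any (fun term => PySem.Str.isIn term description) then
    "Inductor_SMD:L_0603_1608Metric"
  else if ["diode"].any (fun term => PySem.Str.isIn term description) then
    "Diode_SMD:D_SOD-123"
  else if ["transistor", "fet", "mosfet"].any (fun term => PySem.Str.isIn term description) then
    "Package_TO_SOT_SMD:SOT-23"
  else
    "Package_SO:SOIC-8_3.9x4.9mm_P1.27mm"

-- ===== PORT B =====
def keywordPriority : List (String × Nat) :=
  [("res", 0), ("ohm", 0), ("cap", 1), ("ind", 2), ("diode", 3), ("transistor", 4), ("fet", 4)]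

def footprints : List String :=
  [ "Resistor_SMD:R_0603_1608Metric",
    "Capacitor_SMD:C_0603_1608Metric",
    "Inductor_SMD:L_0603_1608Metric",
    "Diode_SMD:D_SOD-123",
    "Package_TO_SOT_SMD:SOT-23",
    "Package_SO:SOIC-8_3.9x4.9mm_P1.27mm" ]

def get_fallback_footprint_py_alt (component_data : List (String × String)) : String :=
  let description := PySem.Str.lower ((PySem.Dict.ofList component_data).getD "Description" "")
  -- min((p for kw, p in _KEYWORD_PRIORITY if kw in description), default=5)
  let best := ((keywordPriority.filterMap
      (fun kp => if PySem.Str.isIn kp.1 description then some kp.2 else none)).min?).getD 5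
  footprints.getD best ""

-- ===== PRECONDITION & SPEC =====
def Spec_get_fallback_footprint_py (component_data : List (String × String)) (out : String) : Prop := out = get_fallback_footprint_py_alt component_data
instance (component_data : List (String × String)) (out : String) : Decidable (Spec_get_fallback_footprint_py component_data out) := by unfold Spec_get_fallback_footprint_py; infer_instance

-- ===== CLAIM (what is proved, stated in full; the proofs are below) =====
def Claim_equal_get_fallback_footprint_py : Prop := ∀ (component_data : List (String × String)), Dom_get_fallback_footprint_py component_data → Spec_get_fallback_footprint_py component_data (get_fallback_footprint_py component_data)

-- ===== LEMMAS AND PROOFS =====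

-- substring subsumption: if a is an infix of b and a is not in l, then b is not in l
theorem chars_isIn_false_of_infix (a b : List Char) (l : List Char)
    (hab : a <:+: b) (h : PySem.Chars.isIn a l = false) : PySem.Chars.isIn b l = false := by
  rw [PySem.Chars.isIn_eq_false_iff] at h ⊢
  exact fun hb => h (hab.trans hb)

theorem subsume_res (l : List Char) (h : PySem.Chars.isIn ['r','e','s'] l = false) :
    PySem.Chars.isIn ['r','e','s','i','s','t','o','r'] l = false :=
  chars_isIn_false_of_infix _ _ _ (by decide) h

theorem subsume_cap (l : List Char) (h : PySem.Chars.isIn ['c','a','p'] l = false) :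
    PySem.Chars.isIn ['c','a','p','a','c','i','t','o','r'] l = false :=
  chars_isIn_false_of_infix _ _ _ (by decide) h

theorem subsume_ind (l : List Char) (h : PySem.Chars.isIn ['i','n','d'] l = false) :
    PySem.Chars.isIn ['i','n','d','u','c','t','o','r'] l = false :=
  chars_isIn_false_of_infix _ _ _ (by decide) h

theorem subsume_fet (l : List Char) (h : PySem.Chars.isIn ['f','e','t'] l = false) :
    PySem.Chars.isIn ['m','o','s','f','e','t'] l = false :=
  chars_isIn_false_of_infix _ _ _ (by decide) h

-- ===== VERDICT (by name: the statement is the Claim_ definition above) =====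
theorem get_fallback_footprint_py_spec : Claim_equal_get_fallback_footprint_py := by
  intro component_data _
  unfold Spec_get_fallback_footprint_py get_fallback_footprint_py get_fallback_footprint_py_alt
  simp only [keywordPriority, footprints, List.any, List.filterMap]
  set d := PySem.Str.lower ((PySem.Dict.ofList component_data).getD "Description" "") with hd
  by_cases h1 : PySem.Str.isIn "res" d = true <;>
  by_cases h2 : PySem.Str.isIn "ohm" d = true <;>
  by_cases h3 : PySem.Str.isIn "cap" d = true <;>
  by_cases h4 : PySem.Str.isIn "ind" d = true <;>
  by_cases h5 : PySem.Str.isIn "diode" d = true <;>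
  by_cases h6 : PySem.Str.isIn "transistor" d = true <;>
  by_cases h7 : PySem.Str.isIn "fet" d = true <;>
  simp_all [subsume_res, subsume_cap, subsume_ind, subsume_fet,
    Bool.not_eq_true, List.min?]
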